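-- pv_equiv track=rewrite | github.com/elizabethMichel/OCW6.864 | pcfg_dynamic.py | word_categories
-- ===== SOURCE A (Python) =====
-- def word_categories(s: list, t_rules: dict):
--     cat = {}
--     for x in t_rules.items():
--         for value in x[1]:
--             cat[value[0]] = x[0]
--
--     cat_s = []
--     for w in s:
--         category = cat.get(w, "undefined")
--         cat_s.append((w, category))
--     return cat_s
-- ===== SOURCE B (Python) =====
-- def word_categories(s: list, t_rules: dict):
--     # For each word, scan the rules in reverse and take the first matching
--     # category (= last match in insertion order), 'undefined' if none.
--     rules_rev = list(t_rules.items())[::-1]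
--
--     def lookup(w):
--         for key, vals in rules_rev:
--             if any(v[0] == w for v in vals):
--                 return key
--         return "undefined"
--
--     return [(w, lookup(w)) for w in s]
-- ===== Notes on version B (the rewrite author's own statement) =====
-- stated objective: alternative
-- what changed: Replaces the build-inverted-dict-then-lookup strategy by a per-word reverse scan of the rules that returns the first (i.e. last-in-order) category whose value list contains the word.
import Mathlib
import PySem

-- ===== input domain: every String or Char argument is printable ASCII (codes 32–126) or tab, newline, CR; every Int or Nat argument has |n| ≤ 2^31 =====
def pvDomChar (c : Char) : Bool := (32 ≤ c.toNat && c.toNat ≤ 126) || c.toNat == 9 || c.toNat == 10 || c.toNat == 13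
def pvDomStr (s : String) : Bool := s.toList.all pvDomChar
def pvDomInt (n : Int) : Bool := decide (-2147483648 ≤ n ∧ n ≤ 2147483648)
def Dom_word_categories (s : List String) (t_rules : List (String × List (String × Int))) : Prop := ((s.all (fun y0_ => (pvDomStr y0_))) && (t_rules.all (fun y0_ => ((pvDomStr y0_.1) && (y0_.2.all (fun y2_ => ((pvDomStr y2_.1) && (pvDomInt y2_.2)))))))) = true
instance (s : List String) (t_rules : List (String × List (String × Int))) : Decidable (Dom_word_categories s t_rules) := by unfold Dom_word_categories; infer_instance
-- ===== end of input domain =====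

-- B replaces A's inverted-dict build + per-word lookup by a per-word reverse scan of the
-- rules (first match in reverse = A's last-write-wins); same values, alternative algorithm.

-- ===== PORT A =====
def word_categories (s : List String) (t_rules : List (String × List (String × Int))) : List (String × String) :=
  let cat : PySem.Dict String String :=
    t_rules.foldl (fun cat x => x.2.foldl (fun cat value => cat.insert value.1 x.1) cat) PySem.Dict.empty
  s.foldl (fun cat_s w => cat_s ++ [(w, cat.getD w "undefined")]) []

-- ===== PORT B =====
-- first matching category scanning the given (already reversed) rules front to back
def wcLookup (w : String) : List (String × List (String × Int)) → String
  | [] => "undefined"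
  | x :: rest => if x.2.any (fun v => v.1 == w) then x.1 else wcLookup w rest

def word_categories_alt (s : List String) (t_rules : List (String × List (String × Int))) : List (String × String) :=
  s.map (fun w => (w, wcLookup w t_rules.reverse))

-- ===== PRECONDITION & SPEC =====
def Spec_word_categories (s : List String) (t_rules : List (String × List (String × Int))) (out : List (String × String)) : Prop := out = word_categories_alt s t_rules
instance (s : List String) (t_rules : List (String × List (String × Int))) (out : List (String × String)) : Decidable (Spec_word_categories s t_rules out) := by unfold Spec_word_categories; infer_instance

-- ===== CLAIM (what is proved, stated in full; the proofs are below) =====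
def Claim_equal_word_categories : Prop := ∀ (s : List String) (t_rules : List (String × List (String × Int))), Dom_word_categories s t_rules → Spec_word_categories s t_rules (word_categories s t_rules)

-- ===== LEMMAS AND PROOFS =====

lemma wcLookup_append (w : String) (a b : List (String × List (String × Int))) :
    wcLookup w (a ++ b) =
      if a.any (fun x => x.2.any (fun v => v.1 == w)) then wcLookup w a else wcLookup w b := by
  induction a with
  | nil => simp
  | cons x rest ih =>
    by_cases hx : x.2.any (fun v => v.1 == w) = true
    · simp [wcLookup, hx]
    · simp only [Bool.not_eq_true] at hx
      simp only [List.cons_append, wcLookup, hx, if_false, Bool.false_eq_true, List.any_cons,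
        Bool.false_or]
      exact ih

lemma wcLookup_of_no_match (w : String) (a : List (String × List (String × Int)))
    (h : a.any (fun x => x.2.any (fun v => v.1 == w)) = false) :
    wcLookup w a = "undefined" := by
  induction a with
  | nil => rfl
  | cons x rest ih =>
    simp only [List.any_cons, Bool.or_eq_false_iff] at h
    simp [wcLookup, h.1, ih h.2]

lemma inner_getD (k : String) (l : List (String × Int)) (d : PySem.Dict String String) (w : String) :
    (l.foldl (fun c v => c.insert v.1 k) d).getD w "undefined" =
      if l.any (fun v => v.1 == w) then k else d.getD w "undefined" := by
  induction l generalizing d with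
  | nil => simp
  | cons v rest ih =>
    simp only [List.foldl_cons, List.any_cons, ih, PySem.Dict.getD_insert]
    by_cases hv : v.1 = w
    · simp [hv]
    · have hb : (v.1 == w) = false := by simp [hv]
      have hne : w ≠ v.1 := fun h => hv h.symm
      simp only [hb, Bool.false_or]
      simp [hne]

lemma outer_getD (rs : List (String × List (String × Int))) (d : PySem.Dict String String) (w : String) :
    (rs.foldl (fun cat x => x.2.foldl (fun c v => c.insert v.1 x.1) cat) d).getD w "undefined" =
      if rs.any (fun x => x.2.any (fun v => v.1 == w)) then wcLookup w rs.reverse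
      else d.getD w "undefined" := by
  induction rs generalizing d with
  | nil => simp
  | cons x rest ih =>
    simp only [List.foldl_cons, List.any_cons, List.reverse_cons, ih, inner_getD,
      wcLookup_append, List.any_reverse]
    by_cases hr : rest.any (fun x => x.2.any (fun v => v.1 == w)) = true
    · simp [hr]
    · by_cases hx : x.2.any (fun v => v.1 == w) = true
      · simp [hr, hx, wcLookup]
      · simp [hr, hx]

lemma foldl_append_pairs (f : String → String) (l : List String) (acc : List (String × String)) :
    l.foldl (fun cs w => cs ++ [(w, f w)]) acc = acc ++ l.map (fun w => (w, f w)) := by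
  induction l generalizing acc with
  | nil => simp
  | cons w rest ih => simp [ih]

-- ===== VERDICT (by name: the statement is the Claim_ definition above) =====
theorem word_categories_spec : Claim_equal_word_categories := by
  intro s t_rules _
  unfold Spec_word_categories word_categories word_categories_alt
  rw [foldl_append_pairs]
  simp only [List.nil_append]
  apply List.map_congr_left
  intro w _
  rw [outer_getD]
  by_cases h : t_rules.any (fun x => x.2.any (fun v => v.1 == w)) = true
  · simp [h]
  · rw [if_neg h, wcLookup_of_no_match w _ (by simpa [List.any_reverse] using h)]
    simp
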